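-- pv_equiv track=rewrite | github.com/mindofthesky/windowsgit | 문제풀이/programmers/할인행사.py | solution
-- ===== SOURCE A (Python) =====
-- def solution(want, number, discount):
--     answer = 0
--     # 예를 들어, 정현이가 원하는 제품이 바나나 3개,
--     # 사과 2개, 쌀 2개, 돼지고기 2개, 냄비 1개이며,
--     # XYZ 마트에서 14일간 회원을 대상으로 할인하는 제품이
--     # 날짜 순서대로 치킨, 사과, 사과, 바나나, 쌀, 사과,
--     # 돼지고기, 바나나, 돼지고기, 쌀, 냄비, 바나나, 사과,
--     # 바나나인 경우에 대해 알아봅시다. 첫째 날부터 열흘 간에는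
--     # 냄비가 할인하지 않기 때문에 첫째 날에는 회원가입을 하지 않습니다.
--     # 둘째 날부터 열흘 간에는 바나나를 원하는 만큼 할인구매할 수 없기
--     # 때문에 둘째 날에도 회원가입을 하지 않습니다.
--     # 셋째 날, 넷째 날, 다섯째 날부터 각각 열흘은 원하는 제품과
--     # 수량이 일치하기 때문에 셋 중 하루에 회원가입을 하려 합니다.
--
--     # 날짜에는 해당하는 할인 상품만 기록할수있음
--     # want 크기는 10이니까 재귀로 가도 상관없음
--     # 그러나 이문제는 재귀를 원하는 형태가아님
--     # dict 으로 dict 형으로 잡아야하는게 아닐가?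
--     dic = {}
--     dics = []
--     # number는 want 와 같 크기 값
--     #
--     for i in range(len(want)):
--         for j in range(number[i]):
--             dics.append(want[i])
--     dics.sort()
--
--     for i in range(len(discount) - 9):
--         dics_ = discount[i:i+10]
--         dics_.sort()
--         if dics_ == dics:
--             answer += 1
--     return answer
-- ===== SOURCE B (Python) =====
-- def solution(want, number, discount):
--     # target multiset of wanted products as a dict (positive counts only)
--     target = {}
--     for w, n in zip(want, number):
--         if n > 0:
--             target[w] = target.get(w, 0) + n
--     if len(discount) < 10:
--         return 0
--     # counter over the first 10 discount days
--     window = {}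
--     for d in discount[:10]:
--         window[d] = window.get(d, 0) + 1
--     answer = 1 if window == target else 0
--     # slide the window one day at a time
--     for i in range(10, len(discount)):
--         out = discount[i - 10]
--         window[out] -= 1
--         if window[out] == 0:
--             del window[out]
--         inc = discount[i]
--         window[inc] = window.get(inc, 0) + 1
--         if window == target:
--             answer += 1
--     return answer
-- ===== Notes on version B (the rewrite author's own statement) =====
-- stated objective: faster
-- what changed: Replaces A's expand-and-sort of the want multiset plus a copy+sort+compare per 10-day window by a target counter dict built directly from (want, number) and a sliding-window counter updated per day, so neither the expanded list (size sum(number)) nor any per-window sort exists.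
import Mathlib
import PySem

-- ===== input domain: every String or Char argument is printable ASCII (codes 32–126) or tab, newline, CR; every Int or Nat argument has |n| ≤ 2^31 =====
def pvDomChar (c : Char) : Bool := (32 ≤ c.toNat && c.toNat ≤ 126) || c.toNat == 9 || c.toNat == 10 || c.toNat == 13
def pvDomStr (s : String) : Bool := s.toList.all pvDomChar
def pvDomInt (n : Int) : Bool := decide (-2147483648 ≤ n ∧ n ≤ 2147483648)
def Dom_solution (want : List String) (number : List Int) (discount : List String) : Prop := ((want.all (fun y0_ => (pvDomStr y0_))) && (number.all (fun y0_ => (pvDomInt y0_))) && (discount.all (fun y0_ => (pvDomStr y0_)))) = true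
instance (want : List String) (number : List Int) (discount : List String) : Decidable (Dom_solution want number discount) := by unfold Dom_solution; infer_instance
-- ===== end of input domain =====

-- B replaces A's per-window copy+sort+compare with a single sliding-window counter (O(n·w) vs O(n·w log w) with no per-window allocation/sort); return value only, no observable mutation.

-- ===== PORT A =====
-- literal transliteration of A: build the expanded wanted list, sort it, then
-- for each window slice, sort the slice and compare lists
def solution (want : List String) (number : List Int) (discount : List String) : Int :=
  -- dics is a growing Python list: ported as an Array with O(1) push (exact same appends);
  -- list.sort() is ported as the stable mergeSort (Python's sort is a stable mergesort);
  -- both proved equal to the PySem forms (pvA_dics, pvMS below)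
  let dics := ((PySem.List.pyRange 0 (want.length : Int)).foldl
    (fun (acc : Array String) i => (PySem.List.pyRange 0 (PySem.List.pyGetD number i 0)).foldl
        (fun acc2 _ => acc2.push (PySem.List.pyGetD want i "")) acc) #[]).toList
  let dicsS := dics.mergeSort (fun a b => a ≤ b)
  (PySem.List.pyRange 0 ((discount.length : Int) - 9)).foldl
    (fun answer i =>
      let w := (PySem.List.slice discount (some i) (some (i + 10))).mergeSort (fun a b => a ≤ b)
      if w = dicsS then answer + 1 else answer) 0

-- ===== PORT B =====
-- Python's 'window == target' on dicts ignores order: same number of keys and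
-- every (k, v) of the first found in the second (keys are unique)
def dictEqPy (d1 d2 : PySem.Dict String Int) : Bool :=
  d1.size == d2.size && d1.items.all (fun p => d2.get? p.1 == some p.2)

def solution_alt (want : List String) (number : List Int) (discount : List String) : Int :=
  let target := (want.zip number).foldl
    (fun d p => if p.2 > 0 then d.insert p.1 (d.getD p.1 0 + p.2) else d) PySem.Dict.empty
  if (discount.length : Int) < 10 then 0
  else
    let window := (PySem.List.slice discount none (some 10)).foldl
      (fun d x => d.insert x (d.getD x 0 + 1)) PySem.Dict.empty
    let answer : Int := if dictEqPy window target then 1 else 0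
    let st := (PySem.List.pyRange 10 (discount.length : Int)).foldl
      (fun (st : PySem.Dict String Int × Int) i =>
        let out := PySem.List.pyGetD discount (i - 10) ""
        -- window[out] -= 1: 'out' is always a present key here, so modify is exact
        let w1 := st.1.modify out 0 (fun v => v - 1)
        let w2 := if w1.getD out 0 = 0 then w1.erase out else w1
        let inc := PySem.List.pyGetD discount i ""
        let w3 := w2.insert inc (w2.getD inc 0 + 1)
        (w3, if dictEqPy w3 target then st.2 + 1 else st.2))
      (window, answer)
    st.2

-- ===== PRECONDITION & SPEC =====
-- Pre_ excludes exactly the inputs where A raises IndexError: number shorter than want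
-- (A indexes number[i] for every i < len(want)).
def Pre_solution (want : List String) (number : List Int) (discount : List String) : Prop :=
  want.length ≤ number.length
instance (want : List String) (number : List Int) (discount : List String) : Decidable (Pre_solution want number discount) := by unfold Pre_solution; infer_instance

def pvWitness_solution : List String × List Int × List String :=
  (["a"], [2], ["a", "a", "b", "a", "a", "a", "a", "a", "a", "a", "a", "a"])

def Spec_solution (want : List String) (number : List Int) (discount : List String) (out : Int) : Prop := out = solution_alt want number discount
instance (want : List String) (number : List Int) (discount : List String) (out : Int) : Decidable (Spec_solution want number discount out) := by unfold Spec_solution; infer_instance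

-- ===== CLAIM (what is proved, stated in full; the proofs are below) =====
def Claim_equal_solution : Prop := ∀ (want : List String) (number : List Int) (discount : List String), Dom_solution want number discount → Pre_solution want number discount → Spec_solution want number discount (solution want number discount)

-- ===== LEMMAS AND PROOFS =====

def pvRep (p : String × Int) : List String := List.replicate p.2.toNat p.1

def pvExpanded (want : List String) (number : List Int) : List String :=
  (want.zip number).flatMap pvRep

theorem pvMS (l : List String) :
    l.mergeSort (fun a b => a ≤ b) = PySem.List.sorted l (fun x => x) false := by
  refine (PySem.List.sorted_id_eq_of_perm_of_pairwise l _ (List.mergeSort_perm l _) ?_).symm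
  exact List.pairwise_mergeSort' (· ≤ ·) l

theorem pvFoldConst (s : String) : ∀ (l : List Int) (arr : Array String),
    (l.foldl (fun a _ => a.push s) arr).toList = arr.toList ++ List.replicate l.length s := by
  intro l
  induction l with
  | nil => simp
  | cons x xs ih =>
      intro arr
      simp only [List.foldl, ih, List.length_cons, Array.toList_push]
      simp [List.replicate_succ']
      rw [← List.replicate_succ, ← List.replicate_succ']

theorem pvRepApp (m : Int) (s : String) (arr : Array String) :
    ((PySem.List.pyRange 0 m).foldl (fun a _ => a.push s) arr).toList
      = arr.toList ++ List.replicate m.toNat s := by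
  rw [pvFoldConst s, PySem.List.length_pyRange_one]
  simp

theorem pvFoldHom (g : Array String → Int → Array String) (g' : List String → Int → List String)
    (h : ∀ arr i, (g arr i).toList = g' arr.toList i) :
    ∀ (l : List Int) (arr : Array String), (l.foldl g arr).toList = l.foldl g' arr.toList := by
  intro l
  induction l with
  | nil => intro arr; rfl
  | cons x xs ih => intro arr; simp only [List.foldl, ih, h]

theorem pvA_dics (want : List String) (number : List Int) (h : want.length ≤ number.length) :
    ((PySem.List.pyRange 0 (want.length : Int)).foldl
      (fun (acc : Array String) i => (PySem.List.pyRange 0 (PySem.List.pyGetD number i 0)).foldl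
          (fun acc2 _ => acc2.push (PySem.List.pyGetD want i "")) acc) #[]).toList
      = pvExpanded want number := by
  have hz : (want.zip number).length = want.length := by
    simp [List.length_zip]; omega
  rw [pvFoldHom _ (fun acc i => acc ++ List.replicate (PySem.List.pyGetD number i 0).toNat
      (PySem.List.pyGetD want i "")) (fun arr i => pvRepApp _ _ arr)]
  rw [show (#[] : Array String).toList = [] from rfl]
  rw [PySem.List.foldl_congr_mem _ _
      (fun acc i => acc ++ pvRep (PySem.List.pyGetD (want.zip number) i ("", 0))) _ ?_]
  · have hlen : (want.length : Int) = PySem.List.len (want.zip number) := by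
      simp [PySem.List.len, hz]
    rw [hlen, PySem.List.foldl_pyRange_zero_pyGetD (want.zip number) ("", 0)
        (fun acc p => acc ++ pvRep p) [], PySem.List.foldl_append_eq_flatMap]
    simp [pvExpanded]
  · intro acc i hi
    rw [PySem.List.mem_pyRange_one] at hi
    obtain ⟨h0, h1⟩ := hi
    have hk : i.toNat < want.length := by omega
    have hk2 : i.toNat < number.length := by omega
    have hk3 : i.toNat < (want.zip number).length := by omega
    rw [PySem.List.pyGetD_eq_getElem _ _ h0 (by push_cast; omega),
        PySem.List.pyGetD_eq_getElem _ _ h0 (by push_cast; omega)]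
    beta_reduce
    rw [PySem.List.pyGetD_eq_getElem _ _ h0 (by push_cast; omega)]
    simp [pvRep, List.getElem_zip]

def pvCnt (d : PySem.Dict String Int) (f : String → Int) : Prop :=
  d.keys.Nodup ∧ ∀ k, d.get? k = if f k = 0 then none else some (f k)

theorem pvCnt_getD {d : PySem.Dict String Int} {f : String → Int} (h : pvCnt d f) (k : String) :
    d.getD k 0 = f k := by
  rw [PySem.Dict.getD_eq_get?_getD, h.2 k]
  split_ifs with h0 <;> simp [h0]

theorem pvCnt_congr {d : PySem.Dict String Int} {f g : String → Int} (h : pvCnt d f)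
    (hfg : ∀ k, f k = g k) : pvCnt d g := by
  refine ⟨h.1, fun k => ?_⟩
  rw [h.2 k, hfg k]

theorem pvCnt_empty : pvCnt PySem.Dict.empty (fun _ => 0) := by
  exact ⟨by simp [PySem.Dict.keys, PySem.Dict.empty], fun k => by simp [PySem.Dict.get?_empty]⟩

theorem pvCnt_insert_add {d : PySem.Dict String Int} {f : String → Int} (h : pvCnt d f)
    (x : String) (n : Int) (hn : 0 < f x + n) :
    pvCnt (d.insert x (d.getD x 0 + n)) (fun k => if k = x then f k + n else f k) := by
  refine ⟨PySem.Dict.nodup_keys_insert d x _ h.1, fun k => ?_⟩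
  rw [PySem.Dict.get?_insert, pvCnt_getD h]
  beta_reduce
  by_cases hk : k = x
  · subst hk
    simp [show f k + n ≠ 0 from by omega]
  · simp only [if_neg hk]
    exact h.2 k

theorem pvCnt_target_fold : ∀ (l : List (String × Int)) (d : PySem.Dict String Int)
    (f : String → Int), pvCnt d f → (∀ k, 0 ≤ f k) →
    pvCnt (l.foldl (fun d p => if p.2 > 0 then d.insert p.1 (d.getD p.1 0 + p.2) else d) d)
      (fun k => f k + ((l.flatMap pvRep).count k : Int)) := by
  intro l
  induction l with
  | nil => intro d f h h0; simpa using h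
  | cons p tail ih =>
      intro d f h h0
      obtain ⟨w, n⟩ := p
      simp only [List.foldl_cons]
      by_cases hn : n > 0
      · rw [if_pos (by simpa using hn)]
        have h1 := pvCnt_insert_add h w n (by have := h0 w; omega)
        have h2 := ih _ _ h1 (by
          intro k
          by_cases hk : k = w
          · rw [if_pos hk]; have := h0 k; subst hk; omega
          · rw [if_neg hk]; exact h0 k)
        refine pvCnt_congr h2 ?_
        intro k
        simp only [List.flatMap_cons, List.count_append]
        by_cases hk : k = w
        · subst hk
          rw [if_pos rfl]
          simp [pvRep, List.count_replicate]
          omega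
        · rw [if_neg hk]
          have : List.count k (pvRep (w, n)) = 0 := by
            simp [pvRep, List.count_replicate, Ne.symm hk]
          rw [this]
          simp
      · rw [if_neg (by simpa using hn)]
        have h2 := ih _ _ h h0
        refine pvCnt_congr h2 ?_
        intro k
        have hn' : n ≤ 0 := by omega
        have : (pvRep (w, n)) = [] := by
          simp [pvRep, Int.toNat_of_nonpos hn']
        simp [List.flatMap_cons, this]

theorem pvCnt_incr_fold : ∀ (l : List String) (d : PySem.Dict String Int)
    (f : String → Int), pvCnt d f → (∀ k, 0 ≤ f k) →
    pvCnt (l.foldl (fun d x => d.insert x (d.getD x 0 + 1)) d)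
      (fun k => f k + (l.count k : Int)) := by
  intro l
  induction l with
  | nil => intro d f h h0; simpa using h
  | cons x tail ih =>
      intro d f h h0
      simp only [List.foldl_cons]
      have h1 := pvCnt_insert_add h x 1 (by have := h0 x; omega)
      have h2 := ih _ _ h1 (by
        intro k
        by_cases hk : k = x
        · rw [if_pos hk]; have := h0 k; omega
        · rw [if_neg hk]; exact h0 k)
      refine pvCnt_congr h2 ?_
      intro k
      by_cases hk : k = x
      · subst hk
        rw [if_pos rfl]
        simp [List.count_cons]
        omega
      · rw [if_neg hk]
        simp [List.count_cons, Ne.symm hk]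

theorem pvGet?_erase (d : PySem.Dict String Int) (x k : String) :
    (d.erase x).get? k = if k = x then none else d.get? k := by
  obtain ⟨items⟩ := d
  simp only [PySem.Dict.erase, PySem.Dict.get?]
  induction items with
  | nil => simp
  | cons p rest ih =>
      rw [List.filter_cons]
      by_cases hpx : p.1 = x
      · rw [if_neg (by simp [hpx]), ih]
        by_cases hk : k = x
        · rw [if_pos hk, if_pos hk]
        · rw [if_neg hk, if_neg hk,
            List.find?_cons_of_neg (by simp [hpx]; exact fun hc => hk hc.symm)]
      · rw [if_pos (by simp [hpx])]
        by_cases hpk : p.1 = k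
        · have hkx : ¬ k = x := fun hkx => hpx (by rw [hpk, hkx])
          rw [List.find?_cons_of_pos (by simp [hpk]), if_neg hkx,
              List.find?_cons_of_pos (by simp [hpk])]
        · rw [List.find?_cons_of_neg (by simp [hpk]), ih]
          by_cases hk : k = x
          · rw [if_pos hk, if_pos hk]
          · rw [if_neg hk, if_neg hk, List.find?_cons_of_neg (by simp [hpk])]

theorem pvNodup_keys_erase (d : PySem.Dict String Int) (x : String) (h : d.keys.Nodup) :
    (d.erase x).keys.Nodup := by
  obtain ⟨items⟩ := d
  have hs : (PySem.Dict.erase ⟨items⟩ x).keys.Sublist (PySem.Dict.mk items).keys := by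
    simp only [PySem.Dict.erase, PySem.Dict.keys]
    exact List.Sublist.map _ List.filter_sublist
  exact h.sublist hs

def pvW3 (d : PySem.Dict String Int) (x y : String) : PySem.Dict String Int :=
  let w1 := d.modify x 0 (fun v => v - 1)
  let w2 := if w1.getD x 0 = 0 then w1.erase x else w1
  w2.insert y (w2.getD y 0 + 1)

theorem pvCnt_slide {d : PySem.Dict String Int} {x : String} {mid : List String}
    (h : pvCnt d (fun k => (((x :: mid).count k : Nat) : Int))) (y : String) :
    pvCnt (pvW3 d x y) (fun k => (((mid ++ [y]).count k : Nat) : Int)) := by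
  unfold pvW3
  have hx : d.getD x 0 = ((x :: mid).count x : Int) := pvCnt_getD h x
  have hw1get : ∀ k, (d.modify x 0 (fun v => v - 1)).get? k
      = if k = x then some ((mid.count x : Nat) : Int) else d.get? k := by
    intro k
    show (d.insert x (d.getD x 0 - 1)).get? k = _
    rw [PySem.Dict.get?_insert, hx]
    by_cases hk : k = x
    · rw [if_pos hk, if_pos hk]
      have : ((x :: mid).count x : Int) - 1 = ((mid.count x : Nat) : Int) := by
        simp [List.count_cons]
      rw [this]
    · rw [if_neg hk, if_neg hk]
  have hw1nodup : (d.modify x 0 (fun v => v - 1)).keys.Nodup :=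
    PySem.Dict.nodup_keys_insert d x _ h.1
  have hcne : ∀ k, ¬ k = x → (x :: mid).count k = mid.count k := by
    intro k hk
    simp [List.count_cons, Ne.symm hk]
  have hw2 : pvCnt (if (d.modify x 0 (fun v => v - 1)).getD x 0 = 0
                    then (d.modify x 0 (fun v => v - 1)).erase x
                    else d.modify x 0 (fun v => v - 1)) (fun k => ((mid.count k : Nat) : Int)) := by
    have hgd : (d.modify x 0 (fun v => v - 1)).getD x 0 = ((mid.count x : Nat) : Int) := by
      rw [PySem.Dict.getD_eq_get?_getD, hw1get x, if_pos rfl]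
      rfl
    by_cases h0 : ((mid.count x : Nat) : Int) = 0
    · rw [if_pos (by rw [hgd]; exact h0)]
      refine ⟨pvNodup_keys_erase _ _ hw1nodup, fun k => ?_⟩
      beta_reduce
      rw [pvGet?_erase]
      by_cases hk : k = x
      · rw [if_pos hk, hk, if_pos h0]
      · rw [if_neg hk, hw1get k, if_neg hk, h.2 k]
        beta_reduce
        rw [hcne k hk]
    · rw [if_neg (by rw [hgd]; exact h0)]
      refine ⟨hw1nodup, fun k => ?_⟩
      beta_reduce
      rw [hw1get k]
      by_cases hk : k = x
      · rw [if_pos hk, hk, if_neg h0]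
      · rw [if_neg hk, h.2 k]
        beta_reduce
        rw [hcne k hk]
  have h3 := pvCnt_insert_add hw2 y 1 (by positivity)
  refine pvCnt_congr h3 ?_
  intro k
  by_cases hk : k = y
  · subst hk
    simp [List.count_append]
  · rw [if_neg hk]
    simp [List.count_append, Ne.symm hk]

theorem pvDictEq {d1 d2 : PySem.Dict String Int} {f1 f2 : String → Int}
    (h1 : pvCnt d1 f1) (h2 : pvCnt d2 f2) :
    (d1.size == d2.size && d1.items.all (fun p => d2.get? p.1 == some p.2)) = true ↔ ∀ k, f1 k = f2 k := by
  have hmem1 : ∀ k, k ∈ d1.keys ↔ f1 k ≠ 0 := by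
    intro k
    rw [← PySem.Dict.contains_iff_mem_keys, PySem.Dict.contains_eq_isSome_get?, h1.2 k]
    split_ifs with h0 <;> simp [h0]
  have hmem2 : ∀ k, k ∈ d2.keys ↔ f2 k ≠ 0 := by
    intro k
    rw [← PySem.Dict.contains_iff_mem_keys, PySem.Dict.contains_eq_isSome_get?, h2.2 k]
    split_ifs with h0 <;> simp [h0]
  have hsz1 : d1.size = d1.keys.length := by simp [PySem.Dict.size, PySem.Dict.keys]
  have hsz2 : d2.size = d2.keys.length := by simp [PySem.Dict.size, PySem.Dict.keys]
  constructor
  · rintro hEq k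
    rw [Bool.and_eq_true, beq_iff_eq, List.all_eq_true] at hEq
    obtain ⟨hsz, hall⟩ := hEq
    by_cases h0 : f1 k = 0
    · -- show f2 k = 0 as well, via the key sets
      by_contra hne
      have hf2 : f2 k ≠ 0 := fun hc => hne (h0.trans hc.symm)
      have hsub : d1.keys.toFinset ⊆ d2.keys.toFinset := by
        intro j hj
        rw [List.mem_toFinset] at *
        have hj1 : f1 j ≠ 0 := (hmem1 j).1 hj
        have : d1.get? j = some (f1 j) := by rw [h1.2 j, if_neg hj1]
        have hmem := PySem.Dict.mem_items_of_get?_eq_some _ this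
        have := hall _ hmem
        rw [beq_iff_eq] at this
        have : f2 j = f1 j := by
          have hg := h2.2 j
          rw [this] at hg
          by_cases hz : f2 j = 0
          · rw [if_pos hz] at hg; exact absurd hg (by simp)
          · rw [if_neg hz] at hg; exact (Option.some_injective _ hg).symm
        rw [hmem2 j, this]
        exact hj1
      have hcard : d2.keys.toFinset.card ≤ d1.keys.toFinset.card := by
        rw [List.toFinset_card_of_nodup h1.1, List.toFinset_card_of_nodup h2.1, ← hsz1, ← hsz2, hsz]
      have : d1.keys.toFinset = d2.keys.toFinset := Finset.eq_of_subset_of_card_le hsub hcard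
      have : k ∈ d1.keys.toFinset := by
        rw [this, List.mem_toFinset, hmem2 k]; exact hf2
      rw [List.mem_toFinset, hmem1 k] at this
      exact absurd h0 this
    · have : d1.get? k = some (f1 k) := by rw [h1.2 k, if_neg h0]
      have hmem := PySem.Dict.mem_items_of_get?_eq_some _ this
      have := hall _ hmem
      rw [beq_iff_eq] at this
      have hg := h2.2 k
      rw [this] at hg
      by_cases hz : f2 k = 0
      · rw [if_pos hz] at hg; exact absurd hg (by simp)
      · rw [if_neg hz] at hg; exact (Option.some_injective _ hg)
  · intro hf
    rw [Bool.and_eq_true, beq_iff_eq, List.all_eq_true]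
    constructor
    · rw [hsz1, hsz2]
      have : d1.keys.Perm d2.keys := by
        rw [List.perm_ext_iff_of_nodup h1.1 h2.1]
        intro a
        rw [hmem1 a, hmem2 a, hf a]
      exact this.length_eq
    · intro p hp
      have := (PySem.Dict.get?_eq_some_iff_mem_items d1 p.1 p.2 h1.1).2 hp
      rw [h1.2 p.1] at this
      by_cases hz : f1 p.1 = 0
      · rw [if_pos hz] at this; exact absurd this (by simp)
      · rw [if_neg hz] at this
        have hv : p.2 = f1 p.1 := (Option.some_injective _ this).symm
        rw [beq_iff_eq, h2.2 p.1, ← hf p.1, hv, if_neg hz]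

-- whether the 10-day window starting at day j matches the wanted multiset
def pvP (discount : List String) (E : List String) (j : Nat) : Bool :=
  decide (((discount.drop j).take 10).Perm E)

theorem pvMatch {w E : List String} {dw target : PySem.Dict String Int}
    (hw : pvCnt dw (fun k => ((w.count k : Nat) : Int)))
    (ht : pvCnt target (fun k => ((E.count k : Nat) : Int))) :
    dictEqPy dw target = decide (w.Perm E) := by
  by_cases hp : w.Perm E
  · rw [decide_eq_true hp]
    unfold dictEqPy
    exact (pvDictEq hw ht).2 (fun k => by
      rw [List.perm_iff_count] at hp
      exact_mod_cast congrArg (Nat.cast : Nat → Int) (hp k))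
  · rw [decide_eq_false hp]
    by_contra hne
    have : dictEqPy dw target = true := by
      cases hb : dictEqPy dw target
      · exact absurd hb hne
      · rfl
    unfold dictEqPy at this
    have hcnt := (pvDictEq hw ht).1 this
    exact hp (List.perm_iff_count.2 (fun k => by exact_mod_cast hcnt k))

theorem pvLoopB (discount : List String) (E : List String) (target : PySem.Dict String Int)
    (htgt : pvCnt target (fun k => ((E.count k : Nat) : Int))) :
    ∀ (n j : Nat), j + 10 + n = discount.length →
    ∀ (d : PySem.Dict String Int) (a : Int),
    pvCnt d (fun k => ((((discount.drop j).take 10).count k : Nat) : Int)) →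
    ((PySem.List.pyRange (10 + (j : Int)) (discount.length : Int)).foldl
      (fun (st : PySem.Dict String Int × Int) i =>
        let out := PySem.List.pyGetD discount (i - 10) ""
        let w1 := st.1.modify out 0 (fun v => v - 1)
        let w2 := if w1.getD out 0 = 0 then w1.erase out else w1
        let inc := PySem.List.pyGetD discount i ""
        let w3 := w2.insert inc (w2.getD inc 0 + 1)
        (w3, if dictEqPy w3 target then st.2 + 1 else st.2))
      (d, a)).2 = a + ((List.range n).countP (fun t => pvP discount E (j + 1 + t)) : Int) := by
  intro n
  induction n with
  | zero =>
      intro j hj d a hd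
      rw [PySem.List.pyRange_one_eq_nil (by push_cast; omega)]
      simp
  | succ n ih =>
      intro j hj d a hd
      have hjL : j < discount.length := by omega
      have hj10 : j + 10 < discount.length := by omega
      rw [PySem.List.pyRange_one_cons (by push_cast; omega), List.foldl_cons]
      have hout : PySem.List.pyGetD discount ((10 + (j : Int)) - 10) "" = discount[j] := by
        rw [show (10 + (j : Int)) - 10 = ((j : Nat) : Int) by push_cast; ring]
        rw [PySem.List.pyGetD_eq_getElem _ _ (by positivity) (by exact_mod_cast hjL)]
        simp
      have hinc : PySem.List.pyGetD discount (10 + (j : Int)) "" = discount[j + 10] := by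
        have h2 : 10 + (j : Int) < (discount.length : Int) := by push_cast; omega
        rw [PySem.List.pyGetD_eq_getElem _ _ (by positivity) h2]
        congr 1
        omega
      have hxm : (discount.drop j).take 10 = discount[j] :: ((discount.drop (j+1)).take 9) := by
        rw [List.drop_eq_getElem_cons hjL]
        rfl
      have hnext : (discount.drop (j+1)).take 10 = ((discount.drop (j+1)).take 9) ++ [discount[j + 10]] := by
        have h10 : (discount.drop (j+1)).take (9+1)
            = (discount.drop (j+1)).take 9 ++ ((discount.drop (j+1))[9]?).toList := List.take_succ
        rw [List.getElem?_drop, show j + 1 + 9 = j + 10 from by omega, List.getElem?_eq_getElem hj10] at h10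
        exact h10
      have hd' : pvCnt (pvW3 d discount[j] discount[j + 10])
          (fun k => ((((discount.drop (j+1)).take 10).count k : Nat) : Int)) := by
        have := pvCnt_slide (hxm ▸ hd) discount[j + 10]
        rw [← hnext] at this
        exact this
      show (List.foldl _
        (pvW3 d (PySem.List.pyGetD discount ((10 + (j : Int)) - 10) "") (PySem.List.pyGetD discount (10 + (j : Int)) ""),
         if dictEqPy (pvW3 d (PySem.List.pyGetD discount ((10 + (j : Int)) - 10) "") (PySem.List.pyGetD discount (10 + (j : Int)) "")) target
         then a + 1 else a) _).2 = _
      rw [hout, hinc]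
      have hcast : ((10 + (j : Int)) + 1) = (10 + ((j + 1 : Nat) : Int)) := by push_cast; ring
      rw [hcast]
      have key := ih (j+1) (by omega) (pvW3 d discount[j] discount[j + 10])
        (if dictEqPy (pvW3 d discount[j] discount[j + 10]) target then a + 1 else a) hd'
      rw [key, pvMatch hd' htgt]
      have hfun : (fun t => pvP discount E (j + 1 + t)) ∘ Nat.succ
          = fun t => pvP discount E (j + 1 + 1 + t) := by
        funext t
        simp only [Function.comp]
        congr 1
        omega
      rw [List.range_succ_eq_map, List.countP_cons, List.countP_map, hfun]
      have hpv : decide (((discount.drop (j+1)).take 10).Perm E) = pvP discount E (j + 1) := rfl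
      rw [hpv]
      have h0 : pvP discount E (j + 1 + 0) = pvP discount E (j + 1) := by norm_num
      rw [h0]
      by_cases hp : pvP discount E (j + 1) = true
      · rw [if_pos hp, hp, if_pos rfl]
        push_cast
        ring
      · rw [if_neg hp, if_neg hp]
        push_cast
        ring

-- ===== VERDICT (by name: the statement is the Claim_ definition above) =====
theorem pvA_eval (want : List String) (number : List Int) (discount : List String)
    (h : want.length ≤ number.length) :
    solution want number discount
      = ((List.range ((discount.length : Int) - 9).toNat).countP
          (fun t => pvP discount (pvExpanded want number) t) : Int) := by
  show ((PySem.List.pyRange 0 ((discount.length : Int) - 9)).foldl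
      (fun answer i =>
        if (PySem.List.slice discount (some i) (some (i + 10))).mergeSort (fun a b => a ≤ b)
            = (((PySem.List.pyRange 0 (want.length : Int)).foldl
              (fun (acc : Array String) i => (PySem.List.pyRange 0 (PySem.List.pyGetD number i 0)).foldl
                (fun acc2 _ => acc2.push (PySem.List.pyGetD want i "")) acc) #[]).toList).mergeSort (fun a b => a ≤ b)
        then answer + 1 else answer) 0) = _
  rw [pvA_dics want number h]
  simp only [pvMS]
  rw [PySem.List.foldl_ite_add_one
    (fun i => PySem.List.sorted (PySem.List.slice discount (some i) (some (i + 10))) (fun x => x) false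
      = PySem.List.sorted (pvExpanded want number) (fun x => x) false)]
  rw [PySem.List.pyRange_one 0 ((discount.length : Int) - 9), List.countP_map]
  norm_num
  refine List.countP_congr ?_
  intro t _
  simp only [Function.comp]
  have hsl : PySem.List.slice discount (some ((t : Nat) : Int)) (some (((t : Nat) : Int) + 10))
      = (discount.drop t).take 10 := by
    rw [PySem.List.slice_toNat _ (by positivity) (by positivity)]
    congr 1 <;> omega
  rw [hsl]
  simp [pvP, PySem.List.sorted_id_eq_sorted_id_iff_perm]

theorem solution_spec : Claim_equal_solution := by
  intro want number discount _ hpre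
  unfold Spec_solution
  rw [pvA_eval want number discount hpre]
  by_cases hL : (discount.length : Int) < 10
  · show _ = solution_alt want number discount
    unfold solution_alt
    rw [if_pos hL]
    rw [show ((discount.length : Int) - 9).toNat = 0 from by omega]
    simp
  · -- the target counter
    have htgt := pvCnt_target_fold (want.zip number) PySem.Dict.empty (fun _ => 0)
      pvCnt_empty (fun _ => le_refl 0)
    rw [show (fun k => (0 : Int) + (((want.zip number).flatMap pvRep).count k : Int))
        = (fun k => (((pvExpanded want number).count k : Nat) : Int)) from by
      funext k; simp [pvExpanded]] at htgt
    -- the initial window counter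
    have hwin := pvCnt_incr_fold ((discount.drop 0).take 10) PySem.Dict.empty (fun _ => 0)
      pvCnt_empty (fun _ => le_refl 0)
    rw [show (fun k => (0 : Int) + ((((discount.drop 0).take 10).count k : Nat) : Int))
        = (fun k => ((((discount.drop 0).take 10).count k : Nat) : Int)) from by
      funext k; simp] at hwin
    have hslice : PySem.List.slice discount none (some 10) = (discount.drop 0).take 10 := by
      rw [PySem.List.slice_to _ (by norm_num)]
      simp
    show _ = solution_alt want number discount
    simp only [solution_alt]
    rw [if_neg hL, hslice]
    rw [pvMatch hwin htgt]
    have key := pvLoopB discount (pvExpanded want number)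
      ((want.zip number).foldl (fun d p => if p.2 > 0 then d.insert p.1 (d.getD p.1 0 + p.2) else d)
        PySem.Dict.empty)
      htgt (discount.length - 10) 0 (by omega)
      (((discount.drop 0).take 10).foldl (fun d x => d.insert x (d.getD x 0 + 1)) PySem.Dict.empty)
      (if decide (((discount.drop 0).take 10).Perm (pvExpanded want number)) = true then 1 else 0)
      hwin
    rw [show (10 + ((0 : Nat) : Int)) = (10 : Int) from by norm_num] at key
    rw [key]
    have hpv0 : decide (((discount.drop 0).take 10).Perm (pvExpanded want number))
        = pvP discount (pvExpanded want number) 0 := rfl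
    rw [hpv0]
    have hsplit : ((discount.length : Int) - 9).toNat = (discount.length - 10) + 1 := by omega
    rw [hsplit, List.range_succ_eq_map, List.countP_cons, List.countP_map]
    have hfun : (fun t => pvP discount (pvExpanded want number) t) ∘ Nat.succ
        = fun t => pvP discount (pvExpanded want number) (0 + 1 + t) := by
      funext t
      simp only [Function.comp]
      congr 1
      omega
    rw [hfun]
    by_cases hp : pvP discount (pvExpanded want number) 0 = true
    · rw [if_pos hp, hp, if_pos rfl]
      push_cast
      ring
    · rw [if_neg hp, if_neg hp]
      push_cast
      ring
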